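-- pv_equiv track=rewrite | github.com/pranavtalwar/ENGG1202-Assignments | Assignment 2/Assignment 2, programming part 1_ Local Seach/nqueen.py | moveOne
-- ===== SOURCE A (Python) =====
-- def countAttack(queen):
--     count = 0
--     for row1 in range( 0, len(queen) ):
--         for row2 in range( row1 + 1, len( queen ) ):
--             if queen[row1] == queen[row2]:
--                 count += 1
--             elif abs(queen[row1] - queen[row2]) == (row2 - row1):
--                 count += 1
--     return count
--
-- def moveOne(queen):
--     check=0
--     queen2=()
--     min=countAttack(queen)
--     queen=list(queen)
--     for i in range(0,len(queen)):
--         k=queen[i]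
--         for j in range(0,len(queen)):
--             if(j!=k):
--                 queen[i]=j
--                 if(countAttack(queen)<=min):
--                     queen2=tuple(queen)
--                     min=countAttack(queen)
--                     check=1
--         queen[i]=k
--     if(check==0):
--         max=(len(queen)*(len(queen)-1))//2
--         for i in range(0,len(queen)):
--             k=queen[i]
--             for j in range(0,len(queen)):
--                 if(j!=k):
--                     queen[i]=j
--                     if(countAttack(queen)>min):
--                         if(countAttack(queen)<max):
--                             queen2=tuple(queen)
--                             max=countAttack(queen)
--             queen[i]=k
--     return queen2
-- ===== SOURCE B (Python) =====
-- def moveOne(queen):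
--     n = len(queen)
--     # base = number of attacking pairs, computed once
--     base = 0
--     for r1 in range(n):
--         for r2 in range(r1 + 1, n):
--             if queen[r1] == queen[r2] or abs(queen[r1] - queen[r2]) == r2 - r1:
--                 base += 1
--
--     def conflict(i, v):
--         # attacks involving row i if its queen sat at column v
--         c = 0
--         for r in range(n):
--             if r != i and (queen[r] == v or abs(queen[r] - v) == abs(r - i)):
--                 c += 1
--         return c
--
--     best = ()
--     mn = base
--     check = False
--     for i in range(n):
--         k = queen[i]
--         ck = conflict(i, k)
--         for j in range(n):
--             if j != k:
--                 t = base - ck + conflict(i, j)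
--                 if t <= mn:
--                     best = tuple(queen[:i]) + (j,) + tuple(queen[i + 1:])
--                     mn = t
--                     check = True
--     if not check:
--         mx = n * (n - 1) // 2
--         for i in range(n):
--             k = queen[i]
--             ck = conflict(i, k)
--             for j in range(n):
--                 if j != k:
--                     t = base - ck + conflict(i, j)
--                     if mn < t < mx:
--                         best = tuple(queen[:i]) + (j,) + tuple(queen[i + 1:])
--                         mx = t
--     return best
-- ===== Notes on version B (the rewrite author's own statement) =====
-- stated objective: faster
-- what changed: B counts the attacking pairs once and scores every candidate single-queen move by an O(n) incremental conflict delta (conflicts involving the moved row against the fixed others), instead of A's full O(n^2) recount of all pairs for each of the O(n^2) candidate moves.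
import Mathlib
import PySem

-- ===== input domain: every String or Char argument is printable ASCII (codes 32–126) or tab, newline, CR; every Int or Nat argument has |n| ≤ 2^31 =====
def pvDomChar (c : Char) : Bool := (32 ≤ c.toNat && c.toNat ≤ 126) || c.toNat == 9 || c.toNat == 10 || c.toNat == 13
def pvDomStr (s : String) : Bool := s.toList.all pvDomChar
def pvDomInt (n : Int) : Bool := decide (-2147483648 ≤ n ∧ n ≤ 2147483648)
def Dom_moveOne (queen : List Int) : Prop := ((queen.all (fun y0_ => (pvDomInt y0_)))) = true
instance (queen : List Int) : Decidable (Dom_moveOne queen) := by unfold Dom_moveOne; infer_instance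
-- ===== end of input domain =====

-- B recomputes nothing from scratch: it counts the attacking pairs once and scores every
-- candidate move by an O(n) incremental conflict delta, where A recalls the full O(n^2)
-- pair count for each of the O(n^2) moves (objective: faster).

-- ===== PORT A =====
def countAttackA (queen : List Int) : Int :=
  (PySem.List.pyRange 0 (queen.length : Int) 1).foldl (fun count row1 =>
    (PySem.List.pyRange (row1 + 1) (queen.length : Int) 1).foldl (fun c row2 =>
      if PySem.List.pyGetD queen row1 0 = PySem.List.pyGetD queen row2 0 then c + 1
      else if |PySem.List.pyGetD queen row1 0 - PySem.List.pyGetD queen row2 0| = row2 - row1 then c + 1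
      else c) count) 0

-- body of A's phase-1 inner loop (over j), state = (queen, queen2, min, check)
def stepA1 (i k : Int) (s : List Int × List Int × Int × Int) (j : Int) :
    List Int × List Int × Int × Int :=
  if j ≠ k then
    let q' := PySem.List.pySetD s.1 i j
    if countAttackA q' ≤ s.2.2.1 then (q', q', countAttackA q', 1)
    else (q', s.2.1, s.2.2.1, s.2.2.2)
  else s

-- body of A's phase-1 outer loop (over i): run the inner loop, then restore queen[i] = k
def outerA1 (n : Int) (s : List Int × List Int × Int × Int) (i : Int) :
    List Int × List Int × Int × Int :=
  let k := PySem.List.pyGetD s.1 i 0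
  let t := (PySem.List.pyRange 0 n 1).foldl (stepA1 i k) s
  (PySem.List.pySetD t.1 i k, t.2.1, t.2.2.1, t.2.2.2)

-- body of A's phase-2 inner loop, state = (queen, queen2, max)
def stepA2 (mn i k : Int) (s : List Int × List Int × Int) (j : Int) :
    List Int × List Int × Int :=
  if j ≠ k then
    let q' := PySem.List.pySetD s.1 i j
    if countAttackA q' > mn then
      if countAttackA q' < s.2.2 then (q', q', countAttackA q')
      else (q', s.2.1, s.2.2)
    else (q', s.2.1, s.2.2)
  else s

def outerA2 (n mn : Int) (s : List Int × List Int × Int) (i : Int) :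
    List Int × List Int × Int :=
  let k := PySem.List.pyGetD s.1 i 0
  let t := (PySem.List.pyRange 0 n 1).foldl (stepA2 mn i k) s
  (PySem.List.pySetD t.1 i k, t.2.1, t.2.2)

def moveOne (queen : List Int) : List Int :=
  let n : Int := (queen.length : Int)
  let mn0 := countAttackA queen
  let s1 := (PySem.List.pyRange 0 n 1).foldl (outerA1 n) (queen, ([] : List Int), mn0, (0 : Int))
  if s1.2.2.2 = 0 then
    let mx0 := PySem.Int.floordiv (n * (n - 1)) 2
    let s2 := (PySem.List.pyRange 0 n 1).foldl (outerA2 n s1.2.2.1) (s1.1, s1.2.1, mx0)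
    s2.2.1
  else s1.2.1

-- ===== PORT B =====
-- number of attacking pairs, counted once
def baseB (queen : List Int) : Int :=
  (PySem.List.pyRange 0 (queen.length : Int) 1).foldl (fun b r1 =>
    (PySem.List.pyRange (r1 + 1) (queen.length : Int) 1).foldl (fun b r2 =>
      if PySem.List.pyGetD queen r1 0 = PySem.List.pyGetD queen r2 0 ∨
         |PySem.List.pyGetD queen r1 0 - PySem.List.pyGetD queen r2 0| = r2 - r1 then b + 1
      else b) b) 0

-- attacks involving row i if its queen sat at column v (other rows as in `queen`)
def conflictB (queen : List Int) (i v : Int) : Int :=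
  (PySem.List.pyRange 0 (queen.length : Int) 1).foldl (fun c r =>
    if r ≠ i ∧ (PySem.List.pyGetD queen r 0 = v ∨
                |PySem.List.pyGetD queen r 0 - v| = |r - i|) then c + 1
    else c) 0

-- tuple(queen[:i]) + (j,) + tuple(queen[i+1:])
def putB (queen : List Int) (i j : Int) : List Int :=
  PySem.List.slice queen none (some i) ++ [j] ++ PySem.List.slice queen (some (i + 1)) none

-- B's phase-1 inner loop body, state = (best, mn, check)
def stepB1 (queen : List Int) (base ck i k : Int) (s : List Int × Int × Bool) (j : Int) :
    List Int × Int × Bool :=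
  if j ≠ k then
    let c := base - ck + conflictB queen i j
    if c ≤ s.2.1 then (putB queen i j, c, true) else s
  else s

def outerB1 (queen : List Int) (base : Int) (s : List Int × Int × Bool) (i : Int) :
    List Int × Int × Bool :=
  let k := PySem.List.pyGetD queen i 0
  (PySem.List.pyRange 0 (queen.length : Int) 1).foldl
    (stepB1 queen base (conflictB queen i k) i k) s

-- B's phase-2 inner loop body, state = (best, mx)
def stepB2 (queen : List Int) (base ck mn i k : Int) (s : List Int × Int) (j : Int) :
    List Int × Int :=
  if j ≠ k then
    let c := base - ck + conflictB queen i j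
    if mn < c ∧ c < s.2 then (putB queen i j, c) else s
  else s

def outerB2 (queen : List Int) (base mn : Int) (s : List Int × Int) (i : Int) :
    List Int × Int :=
  let k := PySem.List.pyGetD queen i 0
  (PySem.List.pyRange 0 (queen.length : Int) 1).foldl
    (stepB2 queen base (conflictB queen i k) mn i k) s

def moveOne_alt (queen : List Int) : List Int :=
  let n : Int := (queen.length : Int)
  let base := baseB queen
  let s1 := (PySem.List.pyRange 0 n 1).foldl (outerB1 queen base) (([] : List Int), base, false)
  if s1.2.2 then s1.1
  else
    let s2 := (PySem.List.pyRange 0 n 1).foldl (outerB2 queen base s1.2.1)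
      (s1.1, PySem.Int.floordiv (n * (n - 1)) 2)
    s2.1

-- ===== PRECONDITION & SPEC =====
def Spec_moveOne (queen : List Int) (out : List Int) : Prop := out = moveOne_alt queen
instance (queen : List Int) (out : List Int) : Decidable (Spec_moveOne queen out) := by unfold Spec_moveOne; infer_instance

-- ===== CLAIM (what is proved, stated in full; the proofs are below) =====
def Claim_equal_moveOne : Prop := ∀ (queen : List Int), Dom_moveOne queen → Spec_moveOne queen (moveOne queen)

-- ===== LEMMAS AND PROOFS =====

-- attack indicator for one pair
def attInd (x y d : Int) : Int := if x = y ∨ |x - y| = d then 1 else 0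

-- specification form of the pair count
def CA (q : List Int) : Int :=
  ∑ r1 ∈ Finset.range q.length, ∑ r2 ∈ Finset.Ico (r1 + 1) q.length,
    attInd (q.getD r1 0) (q.getD r2 0) ((r2 : Int) - (r1 : Int))

-- specification form of the per-row conflict count
def cInd (q : List Int) (i : Nat) (v : Int) (r : Nat) : Int :=
  if (r : Int) ≠ (i : Int) ∧ (q.getD r 0 = v ∨ |q.getD r 0 - v| = |(r : Int) - (i : Int)|) then 1
  else 0

def CF (q : List Int) (i : Nat) (v : Int) : Int :=
  ∑ r ∈ Finset.range q.length, cInd q i v r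

-- A-state → B-state projections
def absS1 (s : List Int × List Int × Int × Int) : List Int × Int × Bool :=
  (s.2.1, s.2.2.1, decide (s.2.2.2 ≠ 0))

theorem sum_range_list (n : Nat) (f : Nat → Int) :
    ((List.range n).map f).sum = ∑ i ∈ Finset.range n, f i := by
  induction n with
  | zero => simp
  | succ n ih => simp [List.range_succ, Finset.sum_range_succ, ih]

theorem foldl_pyRange_add (a b : Nat) (g : Int → Int) (init : Int) :
    (PySem.List.pyRange (a : Int) (b : Int) 1).foldl (fun acc x => acc + g x) init
      = init + ∑ r ∈ Finset.Ico a b, g (r : Int) := by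
  rw [PySem.List.foldl_add, PySem.List.pyRange_one]
  have h1 : (((b : Int)) - (a : Int)).toNat = b - a := by omega
  rw [h1, List.map_map, sum_range_list, Finset.sum_Ico_eq_sum_range]
  all_goals
    refine congrArg (init + ·) (Finset.sum_congr rfl ?_)
    intro k _
    simp

theorem innerA_sum (q : List Int) (r1 : Nat) (acc : Int) :
    (PySem.List.pyRange ((r1 : Int) + 1) ((q.length : Int)) 1).foldl (fun c row2 =>
      if PySem.List.pyGetD q (r1 : Int) 0 = PySem.List.pyGetD q row2 0 then c + 1
      else if |PySem.List.pyGetD q (r1 : Int) 0 - PySem.List.pyGetD q row2 0| = row2 - (r1 : Int) then c + 1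
      else c) acc
    = acc + ∑ r2 ∈ Finset.Ico (r1 + 1) q.length,
        attInd (q.getD r1 0) (q.getD r2 0) ((r2 : Int) - (r1 : Int)) := by
  have hstep : (fun (c row2 : Int) =>
      if PySem.List.pyGetD q (r1 : Int) 0 = PySem.List.pyGetD q row2 0 then c + 1
      else if |PySem.List.pyGetD q (r1 : Int) 0 - PySem.List.pyGetD q row2 0| = row2 - (r1 : Int) then c + 1
      else c)
      = fun (c row2 : Int) => c + attInd (PySem.List.pyGetD q (r1 : Int) 0) (PySem.List.pyGetD q row2 0) (row2 - (r1 : Int)) := by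
    funext c row2
    unfold attInd
    split_ifs <;> omega
  rw [hstep]
  have hc : ((r1 : Int) + 1) = ((r1 + 1 : Nat) : Int) := by push_cast; ring
  rw [hc, foldl_pyRange_add]
  congr 1
  apply Finset.sum_congr rfl
  intro r2 _
  simp [attInd]

theorem innerB_sum (q : List Int) (r1 : Nat) (acc : Int) :
    (PySem.List.pyRange ((r1 : Int) + 1) ((q.length : Int)) 1).foldl (fun b r2 =>
      if PySem.List.pyGetD q (r1 : Int) 0 = PySem.List.pyGetD q r2 0 ∨
         |PySem.List.pyGetD q (r1 : Int) 0 - PySem.List.pyGetD q r2 0| = r2 - (r1 : Int) then b + 1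
      else b) acc
    = acc + ∑ r2 ∈ Finset.Ico (r1 + 1) q.length,
        attInd (q.getD r1 0) (q.getD r2 0) ((r2 : Int) - (r1 : Int)) := by
  have hstep : (fun (b r2 : Int) =>
      if PySem.List.pyGetD q (r1 : Int) 0 = PySem.List.pyGetD q r2 0 ∨
         |PySem.List.pyGetD q (r1 : Int) 0 - PySem.List.pyGetD q r2 0| = r2 - (r1 : Int) then b + 1
      else b)
      = fun (b r2 : Int) => b + attInd (PySem.List.pyGetD q (r1 : Int) 0) (PySem.List.pyGetD q r2 0) (r2 - (r1 : Int)) := by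
    funext b r2
    unfold attInd
    split_ifs <;> omega
  rw [hstep]
  have hc : ((r1 : Int) + 1) = ((r1 + 1 : Nat) : Int) := by push_cast; ring
  rw [hc, foldl_pyRange_add]
  congr 1
  apply Finset.sum_congr rfl
  intro r2 _
  simp [attInd]

theorem countAttackA_eq (q : List Int) : countAttackA q = CA q := by
  unfold countAttackA
  rw [PySem.List.pyRange_one]
  have h1 : (((q.length : Int)) - 0).toNat = q.length := by omega
  rw [h1, List.foldl_map]
  simp only [zero_add]
  refine Eq.trans (PySem.List.foldl_congr_mem _ _
      (fun (acc : Int) (r1 : Nat) => acc + ∑ r2 ∈ Finset.Ico (r1 + 1) q.length,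
        attInd (q.getD r1 0) (q.getD r2 0) ((r2 : Int) - (r1 : Int))) _
      (fun acc x _ => innerA_sum q x acc)) ?_
  rw [PySem.List.foldl_add, sum_range_list]
  simp [CA]

theorem baseB_eq (q : List Int) : baseB q = CA q := by
  unfold baseB
  rw [PySem.List.pyRange_one]
  have h1 : (((q.length : Int)) - 0).toNat = q.length := by omega
  rw [h1, List.foldl_map]
  simp only [zero_add]
  refine Eq.trans (PySem.List.foldl_congr_mem _ _
      (fun (acc : Int) (r1 : Nat) => acc + ∑ r2 ∈ Finset.Ico (r1 + 1) q.length,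
        attInd (q.getD r1 0) (q.getD r2 0) ((r2 : Int) - (r1 : Int))) _
      (fun acc x _ => innerB_sum q x acc)) ?_
  rw [PySem.List.foldl_add, sum_range_list]
  simp [CA]

theorem conflictB_eq (q : List Int) (i : Nat) (v : Int) :
    conflictB q (i : Int) v = CF q i v := by
  unfold conflictB
  have hstep : (fun (c r : Int) =>
      if r ≠ (i : Int) ∧ (PySem.List.pyGetD q r 0 = v ∨
          |PySem.List.pyGetD q r 0 - v| = |r - (i : Int)|) then c + 1
      else c)
      = fun (c r : Int) => c + (if r ≠ (i : Int) ∧ (PySem.List.pyGetD q r 0 = v ∨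
          |PySem.List.pyGetD q r 0 - v| = |r - (i : Int)|) then 1 else 0) := by
    funext c r
    split_ifs <;> omega
  rw [hstep]
  have h0 := foldl_pyRange_add 0 q.length (fun r => if r ≠ (i : Int) ∧ (PySem.List.pyGetD q r 0 = v ∨
      |PySem.List.pyGetD q r 0 - v| = |r - (i : Int)|) then 1 else 0) 0
  simp only [Nat.cast_zero] at h0
  rw [h0]
  rw [show Finset.Ico 0 q.length = Finset.range q.length from by rw [Finset.range_eq_Ico]]
  unfold CF
  rw [zero_add]
  apply Finset.sum_congr rfl
  intro r _
  simp [cInd]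

theorem getD_set_ne (q : List Int) (i r : Nat) (x : Int) (h : r ≠ i) :
    (q.set i x).getD r 0 = q.getD r 0 := by
  by_cases hr : r < q.length
  · rw [List.getD_eq_getElem _ 0 (by simpa using hr), List.getD_eq_getElem _ 0 hr]
    exact List.getElem_set_ne (Ne.symm h) _
  · rw [List.getD_eq_default _ 0 (by simpa using Nat.le_of_not_lt hr),
      List.getD_eq_default _ 0 (Nat.le_of_not_lt hr)]

theorem getD_set_self (q : List Int) (i : Nat) (x : Int) (hi : i < q.length) :
    (q.set i x).getD i 0 = x := by
  rw [List.getD_eq_getElem _ 0 (by simpa using hi)]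
  simp

theorem attInd_cInd_lo (q : List Int) (i : Nat) (v : Int) (r : Nat) (hr : r < i) :
    attInd (q.getD r 0) v ((i : Int) - (r : Int)) = cInd q i v r := by
  unfold attInd cInd
  have h1 : ((r : Int)) ≠ (i : Int) := by omega
  have h2 : |(r : Int) - (i : Int)| = (i : Int) - (r : Int) := by
    rw [abs_sub_comm]
    exact abs_of_nonneg (by omega)
  rw [h2]
  simp [h1]

theorem attInd_cInd_hi (q : List Int) (i : Nat) (v : Int) (r : Nat) (hr : i < r) :
    attInd v (q.getD r 0) ((r : Int) - (i : Int)) = cInd q i v r := by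
  unfold attInd cInd
  have h1 : ((r : Int)) ≠ (i : Int) := by omega
  have h2 : |(r : Int) - (i : Int)| = (r : Int) - (i : Int) := abs_of_nonneg (by omega)
  have h3 : (v = q.getD r 0 ∨ |v - q.getD r 0| = (r : Int) - (i : Int))
      ↔ (q.getD r 0 = v ∨ |q.getD r 0 - v| = (r : Int) - (i : Int)) := by
    rw [eq_comm, abs_sub_comm]
  rw [h2]
  simp only [h1, ne_eq, not_false_iff, true_and]
  exact if_congr h3 rfl rfl

theorem cInd_self (q : List Int) (i : Nat) (v : Int) : cInd q i v i = 0 := by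
  simp [cInd]

theorem sum_split_at (n i : Nat) (hi : i < n) (F : Nat → Int) :
    ∑ r ∈ Finset.range n, F r
      = (∑ r ∈ Finset.Ico 0 i, F r) + F i + ∑ r ∈ Finset.Ico (i + 1) n, F r := by
  rw [Finset.range_eq_Ico,
    ← Finset.sum_Ico_consecutive _ (Nat.zero_le i) (le_of_lt hi),
    Finset.sum_eq_sum_Ico_succ_bot hi]
  ring

theorem key_delta (q : List Int) (i : Nat) (hi : i < q.length) (v : Int) :
    CA (q.set i v) = CA q - CF q i (q.getD i 0) + CF q i v := by
  have hlen : (q.set i v).length = q.length := by simp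
  have hne : ∀ (r : Nat), r ≠ i → (q.set i v).getD r 0 = q.getD r 0 :=
    fun r h => getD_set_ne q i r v h
  have hself : (q.set i v).getD i 0 = v := getD_set_self q i v hi
  -- inner difference for rows below i
  have inner_lo : ∀ r1 ∈ Finset.Ico 0 i,
      (∑ r2 ∈ Finset.Ico (r1 + 1) q.length,
        attInd ((q.set i v).getD r1 0) ((q.set i v).getD r2 0) ((r2 : Int) - (r1 : Int)))
      = (∑ r2 ∈ Finset.Ico (r1 + 1) q.length,
          attInd (q.getD r1 0) (q.getD r2 0) ((r2 : Int) - (r1 : Int)))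
        - cInd q i (q.getD i 0) r1 + cInd q i v r1 := by
    intro r1 hr1
    have hr1i : r1 < i := (Finset.mem_Ico.mp hr1).2
    have hmem : i ∈ Finset.Ico (r1 + 1) q.length := Finset.mem_Ico.mpr ⟨by omega, hi⟩
    have hsub : ∑ r2 ∈ Finset.Ico (r1 + 1) q.length,
        (attInd ((q.set i v).getD r1 0) ((q.set i v).getD r2 0) ((r2 : Int) - (r1 : Int))
          - attInd (q.getD r1 0) (q.getD r2 0) ((r2 : Int) - (r1 : Int)))
        = cInd q i v r1 - cInd q i (q.getD i 0) r1 := by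
      rw [Finset.sum_eq_single_of_mem i hmem]
      · rw [hne r1 (by omega), hself,
          attInd_cInd_lo q i v r1 hr1i, attInd_cInd_lo q i (q.getD i 0) r1 hr1i]
      · intro r2 hr2 hne2
        rw [hne r1 (by omega), hne r2 hne2]
        ring
    have := Finset.sum_sub_distrib
      (s := Finset.Ico (r1 + 1) q.length)
      (f := fun r2 => attInd ((q.set i v).getD r1 0) ((q.set i v).getD r2 0) ((r2 : Int) - (r1 : Int)))
      (g := fun r2 => attInd (q.getD r1 0) (q.getD r2 0) ((r2 : Int) - (r1 : Int)))
    rw [this] at hsub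
    omega
  -- inner sums for rows above i are unchanged
  have inner_hi : ∀ r1 ∈ Finset.Ico (i + 1) q.length,
      (∑ r2 ∈ Finset.Ico (r1 + 1) q.length,
        attInd ((q.set i v).getD r1 0) ((q.set i v).getD r2 0) ((r2 : Int) - (r1 : Int)))
      = ∑ r2 ∈ Finset.Ico (r1 + 1) q.length,
          attInd (q.getD r1 0) (q.getD r2 0) ((r2 : Int) - (r1 : Int)) := by
    intro r1 hr1
    have hr1i : i < r1 := (Finset.mem_Ico.mp hr1).1
    apply Finset.sum_congr rfl
    intro r2 hr2
    have hr12 : r1 < r2 := by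
      have := (Finset.mem_Ico.mp hr2).1; omega
    rw [hne r1 (by omega), hne r2 (by omega)]
  -- the row-i inner sum IS the conflict count over the high rows
  have row_i : ∀ w : Int,
      (∑ r2 ∈ Finset.Ico (i + 1) q.length,
        attInd w ((q.set i v).getD r2 0) ((r2 : Int) - (i : Int)))
      = ∑ r2 ∈ Finset.Ico (i + 1) q.length, cInd q i w r2 := by
    intro w
    apply Finset.sum_congr rfl
    intro r2 hr2
    have hir2 : i < r2 := by have := (Finset.mem_Ico.mp hr2).1; omega
    rw [hne r2 (by omega)]
    exact attInd_cInd_hi q i w r2 hir2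
  unfold CA CF
  rw [hlen]
  rw [sum_split_at q.length i hi
      (fun r1 => ∑ r2 ∈ Finset.Ico (r1 + 1) q.length,
        attInd ((q.set i v).getD r1 0) ((q.set i v).getD r2 0) ((r2 : Int) - (r1 : Int))),
    sum_split_at q.length i hi
      (fun r1 => ∑ r2 ∈ Finset.Ico (r1 + 1) q.length,
        attInd (q.getD r1 0) (q.getD r2 0) ((r2 : Int) - (r1 : Int))),
    sum_split_at q.length i hi (fun r => cInd q i (q.getD i 0) r),
    sum_split_at q.length i hi (fun r => cInd q i v r)]
  rw [Finset.sum_congr rfl inner_lo, Finset.sum_congr rfl inner_hi]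
  rw [hself, row_i v]
  have row_i_q : (∑ r2 ∈ Finset.Ico (i + 1) q.length,
      attInd (q.getD i 0) (q.getD r2 0) ((r2 : Int) - (i : Int)))
      = ∑ r2 ∈ Finset.Ico (i + 1) q.length, cInd q i (q.getD i 0) r2 := by
    apply Finset.sum_congr rfl
    intro r2 hr2
    exact attInd_cInd_hi q i _ r2 (by have := (Finset.mem_Ico.mp hr2).1; omega)
  rw [row_i_q, cInd_self, cInd_self]
  rw [Finset.sum_add_distrib, Finset.sum_sub_distrib]
  ring

theorem putB_eq (q : List Int) (i : Nat) (hi : i < q.length) (j : Int) :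
    putB q (i : Int) j = q.set i j := by
  unfold putB
  rw [PySem.List.slice_to_natCast]
  rw [show ((i : Int) + 1) = ((i + 1 : Nat) : Int) by push_cast; ring]
  rw [PySem.List.slice_from_natCast]
  rw [List.set_eq_take_cons_drop _ hi]
  simp

theorem inner1_eq (q0 : List Int) (i : Nat) (hi : i < q0.length) (k : Int) (js : List Int) :
    ∀ (s : List Int × List Int × Int × Int),
      (∀ x : Int, s.1.set i x = q0.set i x) →
      (∀ x : Int, (js.foldl (stepA1 (i : Int) k) s).1.set i x = q0.set i x) ∧
      absS1 (js.foldl (stepA1 (i : Int) k) s)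
        = js.foldl (stepB1 q0 (countAttackA q0) (conflictB q0 (i : Int) (q0.getD i 0)) (i : Int) k)
            (absS1 s) := by
  induction js with
  | nil => exact fun s hq => ⟨hq, rfl⟩
  | cons j js ih =>
    intro s hq
    by_cases hjk : j = k
    · have hA : stepA1 (i : Int) k s j = s := by simp [stepA1, hjk]
      have hB : stepB1 q0 (countAttackA q0) (conflictB q0 (i : Int) (q0.getD i 0)) (i : Int) k
          (absS1 s) j = absS1 s := by simp [stepB1, hjk]
      simp only [List.foldl_cons, hA, hB]
      exact ih s hq
    · have hset : PySem.List.pySetD s.1 (i : Int) j = q0.set i j := by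
        rw [PySem.List.pySetD_natCast, hq j]
      have hcnt : countAttackA q0 - conflictB q0 (i : Int) (q0.getD i 0) + conflictB q0 (i : Int) j
          = countAttackA (q0.set i j) := by
        rw [countAttackA_eq (q0.set i j), countAttackA_eq, conflictB_eq, conflictB_eq,
          key_delta q0 i hi j]
      by_cases hle : countAttackA (q0.set i j) ≤ s.2.2.1
      · have hA : stepA1 (i : Int) k s j
            = (q0.set i j, q0.set i j, countAttackA (q0.set i j), 1) := by
          simp [stepA1, hjk, hset, hle]
        have hB : stepB1 q0 (countAttackA q0) (conflictB q0 (i : Int) (q0.getD i 0)) (i : Int) k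
            (absS1 s) j = absS1 (q0.set i j, q0.set i j, countAttackA (q0.set i j), 1) := by
          simp only [stepB1]
          rw [hcnt, putB_eq q0 i hi j, if_pos hjk,
            show (absS1 s).2.1 = s.2.2.1 from rfl, if_pos hle]
          rfl
        simp only [List.foldl_cons, hA, hB]
        exact ih _ (fun x => by rw [List.set_set])
      · have hA : stepA1 (i : Int) k s j = (q0.set i j, s.2.1, s.2.2.1, s.2.2.2) := by
          simp [stepA1, hjk, hset, hle]
        have hB : stepB1 q0 (countAttackA q0) (conflictB q0 (i : Int) (q0.getD i 0)) (i : Int) k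
            (absS1 s) j = absS1 s := by
          simp only [stepB1]
          rw [hcnt, if_pos hjk, show (absS1 s).2.1 = s.2.2.1 from rfl, if_neg hle]
        simp only [List.foldl_cons, hA, hB]
        exact ih _ (fun x => by rw [List.set_set])

theorem outerStep1 (q0 : List Int) (i : Nat) (hin : i < q0.length)
    (s : List Int × List Int × Int × Int) (hs : s.1 = q0) :
    (outerA1 (q0.length : Int) s (i : Int)).1 = q0 ∧
    absS1 (outerA1 (q0.length : Int) s (i : Int))
      = outerB1 q0 (countAttackA q0) (absS1 s) (i : Int) := by
  obtain ⟨h1, h2⟩ := inner1_eq q0 i hin (q0.getD i 0)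
    (PySem.List.pyRange 0 (q0.length : Int) 1) s (fun x => by rw [hs])
  have hk : PySem.List.pyGetD s.1 ((i : Int)) 0 = q0.getD i 0 := by
    rw [hs, PySem.List.pyGetD_natCast]
  constructor
  · simp only [outerA1, hk]
    rw [PySem.List.pySetD_natCast, h1 (q0.getD i 0), List.getD_eq_getElem _ 0 hin,
      List.set_getElem_self]
  · simp only [outerA1, outerB1, hk, PySem.List.pyGetD_natCast]
    exact h2

theorem outer1_eq (q0 : List Int) (is_ : List Nat) :
    ∀ (h : ∀ i ∈ is_, i < q0.length) (s : List Int × List Int × Int × Int), s.1 = q0 →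
    (is_.foldl (fun t (i : Nat) => outerA1 (q0.length : Int) t (i : Int)) s).1 = q0 ∧
    absS1 (is_.foldl (fun t (i : Nat) => outerA1 (q0.length : Int) t (i : Int)) s)
      = is_.foldl (fun t (i : Nat) => outerB1 q0 (countAttackA q0) t (i : Int)) (absS1 s) := by
  induction is_ with
  | nil => exact fun h s hs => ⟨hs, rfl⟩
  | cons i is ih =>
    intro h s hs
    have hin : i < q0.length := h i (by simp)
    obtain ⟨h1, h2⟩ := outerStep1 q0 i hin s hs
    rw [List.foldl_cons, List.foldl_cons]
    obtain ⟨g1, g2⟩ := ih (fun x hx => h x (by simp [hx])) (outerA1 (q0.length : Int) s (i : Int)) h1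
    exact ⟨g1, by rw [g2, h2]⟩

theorem inner2_eq (q0 : List Int) (i : Nat) (hi : i < q0.length) (k mn : Int) (js : List Int) :
    ∀ (s : List Int × List Int × Int),
      (∀ x : Int, s.1.set i x = q0.set i x) →
      (∀ x : Int, (js.foldl (stepA2 mn (i : Int) k) s).1.set i x = q0.set i x) ∧
      (js.foldl (stepA2 mn (i : Int) k) s).2
        = js.foldl (stepB2 q0 (countAttackA q0) (conflictB q0 (i : Int) (q0.getD i 0)) mn (i : Int) k)
            s.2 := by
  induction js with
  | nil => exact fun s hq => ⟨hq, rfl⟩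
  | cons j js ih =>
    intro s hq
    by_cases hjk : j = k
    · have hA : stepA2 mn (i : Int) k s j = s := by simp [stepA2, hjk]
      have hB : stepB2 q0 (countAttackA q0) (conflictB q0 (i : Int) (q0.getD i 0)) mn (i : Int) k
          s.2 j = s.2 := by simp [stepB2, hjk]
      simp only [List.foldl_cons, hA, hB]
      exact ih s hq
    · have hset : PySem.List.pySetD s.1 (i : Int) j = q0.set i j := by
        rw [PySem.List.pySetD_natCast, hq j]
      have hcnt : countAttackA q0 - conflictB q0 (i : Int) (q0.getD i 0) + conflictB q0 (i : Int) j
          = countAttackA (q0.set i j) := by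
        rw [countAttackA_eq (q0.set i j), countAttackA_eq, conflictB_eq, conflictB_eq,
          key_delta q0 i hi j]
      by_cases hgt : countAttackA (q0.set i j) > mn
      · by_cases hlt : countAttackA (q0.set i j) < s.2.2
        · have hA : stepA2 mn (i : Int) k s j
              = (q0.set i j, q0.set i j, countAttackA (q0.set i j)) := by
            simp [stepA2, hjk, hset, hgt, hlt]
          have hB : stepB2 q0 (countAttackA q0) (conflictB q0 (i : Int) (q0.getD i 0)) mn (i : Int) k
              s.2 j = (q0.set i j, countAttackA (q0.set i j)) := by
            simp only [stepB2]
            rw [hcnt, putB_eq q0 i hi j, if_pos hjk, if_pos ⟨hgt, hlt⟩]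
          simp only [List.foldl_cons, hA, hB]
          exact ih _ (fun x => by rw [List.set_set])
        · have hA : stepA2 mn (i : Int) k s j = (q0.set i j, s.2.1, s.2.2) := by
            simp [stepA2, hjk, hset, hgt, hlt]
          have hB : stepB2 q0 (countAttackA q0) (conflictB q0 (i : Int) (q0.getD i 0)) mn (i : Int) k
              s.2 j = s.2 := by
            simp only [stepB2]
            rw [hcnt, if_pos hjk, if_neg (fun hh => hlt hh.2)]
          simp only [List.foldl_cons, hA, hB]
          exact ih _ (fun x => by rw [List.set_set])
      · have hA : stepA2 mn (i : Int) k s j = (q0.set i j, s.2.1, s.2.2) := by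
          simp [stepA2, hjk, hset, hgt]
        have hB : stepB2 q0 (countAttackA q0) (conflictB q0 (i : Int) (q0.getD i 0)) mn (i : Int) k
            s.2 j = s.2 := by
          simp only [stepB2]
          rw [hcnt, if_pos hjk, if_neg (fun hh => hgt hh.1)]
        simp only [List.foldl_cons, hA, hB]
        exact ih _ (fun x => by rw [List.set_set])

theorem outerStep2 (q0 : List Int) (i : Nat) (hin : i < q0.length) (mn : Int)
    (s : List Int × List Int × Int) (hs : s.1 = q0) :
    (outerA2 (q0.length : Int) mn s (i : Int)).1 = q0 ∧
    (outerA2 (q0.length : Int) mn s (i : Int)).2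
      = outerB2 q0 (countAttackA q0) mn s.2 (i : Int) := by
  obtain ⟨h1, h2⟩ := inner2_eq q0 i hin (q0.getD i 0) mn
    (PySem.List.pyRange 0 (q0.length : Int) 1) s (fun x => by rw [hs])
  have hk : PySem.List.pyGetD s.1 ((i : Int)) 0 = q0.getD i 0 := by
    rw [hs, PySem.List.pyGetD_natCast]
  constructor
  · simp only [outerA2, hk]
    rw [PySem.List.pySetD_natCast, h1 (q0.getD i 0), List.getD_eq_getElem _ 0 hin,
      List.set_getElem_self]
  · simp only [outerA2, outerB2, hk, PySem.List.pyGetD_natCast]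
    exact h2

theorem outer2_eq (q0 : List Int) (is_ : List Nat) (mn : Int) :
    ∀ (h : ∀ i ∈ is_, i < q0.length) (s : List Int × List Int × Int), s.1 = q0 →
    (is_.foldl (fun t (i : Nat) => outerA2 (q0.length : Int) mn t (i : Int)) s).1 = q0 ∧
    (is_.foldl (fun t (i : Nat) => outerA2 (q0.length : Int) mn t (i : Int)) s).2
      = is_.foldl (fun t (i : Nat) => outerB2 q0 (countAttackA q0) mn t (i : Int)) s.2 := by
  induction is_ with
  | nil => exact fun h s hs => ⟨hs, rfl⟩
  | cons i is ih =>
    intro h s hs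
    have hin : i < q0.length := h i (by simp)
    obtain ⟨h1, h2⟩ := outerStep2 q0 i hin mn s hs
    rw [List.foldl_cons, List.foldl_cons]
    obtain ⟨g1, g2⟩ := ih (fun x hx => h x (by simp [hx])) (outerA2 (q0.length : Int) mn s (i : Int)) h1
    exact ⟨g1, by rw [g2, h2]⟩

theorem main_eq (queen : List Int) : moveOne queen = moveOne_alt queen := by
  have hbase : baseB queen = countAttackA queen := by rw [baseB_eq, countAttackA_eq]
  have hrange : PySem.List.pyRange 0 ((queen.length : Int)) 1
      = (List.range queen.length).map (fun (k : Nat) => (k : Int)) := by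
    rw [PySem.List.pyRange_one]
    have h1 : (((queen.length : Int)) - 0).toNat = queen.length := by omega
    rw [h1]
    exact List.map_congr_left (fun a _ => zero_add ((a : Int)))
  have hmem : ∀ i ∈ List.range queen.length, i < queen.length := fun i hi => List.mem_range.mp hi
  obtain ⟨hA1, hB1⟩ := outer1_eq queen (List.range queen.length) hmem
    (queen, ([] : List Int), countAttackA queen, (0 : Int)) rfl
  have hstart : absS1 (queen, ([] : List Int), countAttackA queen, (0 : Int))
      = (([] : List Int), countAttackA queen, false) := rfl
  rw [hstart] at hB1
  simp only [moveOne, moveOne_alt, hbase, hrange, List.foldl_map]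
  set sA := (List.range queen.length).foldl
    (fun t (i : Nat) => outerA1 ((queen.length : Int)) t ((i : Nat) : Int))
    (queen, ([] : List Int), countAttackA queen, (0 : Int)) with hsA
  set sB := (List.range queen.length).foldl
    (fun t (i : Nat) => outerB1 queen (countAttackA queen) t ((i : Nat) : Int))
    (([] : List Int), countAttackA queen, false) with hsB
  have e1 : sA.2.1 = sB.1 := congrArg (fun p => p.1) hB1
  have e2 : sA.2.2.1 = sB.2.1 := congrArg (fun p => p.2.1) hB1
  have e3 : decide (sA.2.2.2 ≠ 0) = sB.2.2 := congrArg (fun p => p.2.2) hB1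
  by_cases hch : sA.2.2.2 = 0
  · have hb : sB.2.2 = false := by rw [← e3, hch]; decide
    rw [if_pos hch, hb]
    simp only [Bool.false_eq_true, if_false]
    obtain ⟨hA2, hB2⟩ := outer2_eq queen (List.range queen.length) sA.2.2.1 hmem
      (sA.1, sA.2.1, PySem.Int.floordiv ((queen.length : Int) * ((queen.length : Int) - 1)) 2)
      hA1
    rw [← e1, ← e2]
    exact congrArg (fun p => p.1) hB2
  · have hb : sB.2.2 = true := by
      rw [← e3]
      simp [hch]
    rw [if_neg hch, hb]
    simp only [if_true]
    exact e1

-- ===== VERDICT (by name: the statement is the Claim_ definition above) =====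
theorem moveOne_spec : Claim_equal_moveOne := by
  intro queen _
  unfold Spec_moveOne
  exact main_eq queen
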